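-- pv_equiv track=rewrite | github.com/paiml/depyler | examples/hard_egg_drop.py | max_floors_with_trials
-- ===== SOURCE A (Python) =====
-- def max_floors_with_trials(eggs: int, trials: int) -> int:
--     """Return maximum number of floors that can be checked with given eggs and trials."""
--     dp: list[list[int]] = []
--     i: int = 0
--     while i <= eggs:
--         row: list[int] = []
--         j: int = 0
--         while j <= trials:
--             row.append(0)
--             j = j + 1
--         dp.append(row)
--         i = i + 1
--     t: int = 1
--     while t <= trials:
--         e: int = 1
--         while e <= eggs:
--             dp[e][t] = dp[e - 1][t - 1] + dp[e][t - 1] + 1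
--             e = e + 1
--         t = t + 1
--     return dp[eggs][trials]
-- ===== SOURCE B (Python) =====
-- def max_floors_with_trials(eggs: int, trials: int) -> int:
--     """Return maximum number of floors that can be checked with given eggs and trials.
--
--     Closed form: sum of binomial coefficients C(trials, i) for i = 1..eggs,
--     computed incrementally in O(eggs) instead of the O(eggs*trials) DP table.
--     """
--     total = 0
--     c = 1
--     for i in range(1, eggs + 1):
--         c = c * (trials - i + 1) // i
--         total += c
--     return total
-- ===== Notes on version B (the rewrite author's own statement) =====
-- stated objective: faster
-- what changed: Replaces the O(eggs*trials) two-dimensional DP table with the closed form sum_{i=1..eggs} C(trials,i), computing each binomial coefficient incrementally in a single O(eggs) pass.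
import Mathlib
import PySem

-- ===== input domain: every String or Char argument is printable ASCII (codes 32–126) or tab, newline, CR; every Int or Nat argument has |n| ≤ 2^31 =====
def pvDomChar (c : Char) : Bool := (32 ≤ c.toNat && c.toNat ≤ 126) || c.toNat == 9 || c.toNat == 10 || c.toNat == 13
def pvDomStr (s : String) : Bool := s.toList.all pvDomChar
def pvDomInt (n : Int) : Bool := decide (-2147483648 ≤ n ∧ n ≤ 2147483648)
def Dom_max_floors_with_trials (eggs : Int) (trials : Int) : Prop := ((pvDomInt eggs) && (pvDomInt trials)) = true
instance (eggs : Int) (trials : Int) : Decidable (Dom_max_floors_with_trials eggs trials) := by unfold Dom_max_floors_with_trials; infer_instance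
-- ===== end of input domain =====

-- B replaces A's O(eggs*trials) DP table by the closed form sum_{i=1..eggs} C(trials,i),
-- each binomial coefficient computed incrementally; objective: faster (asymptotic).

-- ===== PORT A =====
-- inner 'while j <= trials: row.append(0)' loop
def pvRowLoop (trials : Int) (row : List Int) (j : Int) : List Int :=
  if j ≤ trials then pvRowLoop trials (row ++ [0]) (j + 1) else row
termination_by (trials + 1 - j).toNat
decreasing_by omega

-- outer 'while i <= eggs' init loop
def pvInitLoop (eggs trials : Int) (dp : List (List Int)) (i : Int) : List (List Int) :=
  if i ≤ eggs then pvInitLoop eggs trials (dp ++ [pvRowLoop trials [] 0]) (i + 1) else dp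
termination_by (eggs + 1 - i).toNat
decreasing_by omega

-- inner 'while e <= eggs' update loop: dp[e][t] = dp[e-1][t-1] + dp[e][t-1] + 1
def pvELoop (eggs t : Int) (dp : List (List Int)) (e : Int) : List (List Int) :=
  if e ≤ eggs then
    pvELoop eggs t
      (PySem.List.pySetD dp e (PySem.List.pySetD (PySem.List.pyGetD dp e []) t
        (PySem.List.pyGetD (PySem.List.pyGetD dp (e - 1) []) (t - 1) 0
          + PySem.List.pyGetD (PySem.List.pyGetD dp e []) (t - 1) 0 + 1))) (e + 1)
  else dp
termination_by (eggs + 1 - e).toNat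
decreasing_by omega

-- outer 'while t <= trials' loop
def pvTLoop (eggs trials : Int) (dp : List (List Int)) (t : Int) : List (List Int) :=
  if t ≤ trials then pvTLoop eggs trials (pvELoop eggs t dp 1) (t + 1) else dp
termination_by (trials + 1 - t).toNat
decreasing_by omega

def max_floors_with_trials (eggs : Int) (trials : Int) : Int :=
  let dp0 := pvInitLoop eggs trials [] 0
  let dp1 := pvTLoop eggs trials dp0 1
  PySem.List.pyGetD (PySem.List.pyGetD dp1 eggs []) trials 0

-- ===== PORT B =====
-- 'for i in range(1, eggs+1)' fold over state (total, c)
def max_floors_with_trials_alt (eggs : Int) (trials : Int) : Int :=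
  ((PySem.List.pyRange 1 (eggs + 1) 1).foldl
    (fun (s : Int × Int) (i : Int) =>
      let c := PySem.Int.floordiv (s.2 * (trials - i + 1)) i
      (s.1 + c, c)) (0, 1)).1

-- ===== PRECONDITION & SPEC =====
-- Pre_ excludes exactly the inputs where A raises IndexError (negative eggs or trials).
def Pre_max_floors_with_trials (eggs : Int) (trials : Int) : Prop := 0 ≤ eggs ∧ 0 ≤ trials
instance (eggs : Int) (trials : Int) : Decidable (Pre_max_floors_with_trials eggs trials) := by
  unfold Pre_max_floors_with_trials; infer_instance

def pvWitness_max_floors_with_trials : Int × Int := (3, 10)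

def Spec_max_floors_with_trials (eggs : Int) (trials : Int) (out : Int) : Prop :=
  out = max_floors_with_trials_alt eggs trials
instance (eggs : Int) (trials : Int) (out : Int) : Decidable (Spec_max_floors_with_trials eggs trials out) := by
  unfold Spec_max_floors_with_trials; infer_instance

-- ===== CLAIM (what is proved, stated in full; the proofs are below) =====
def Claim_equal_max_floors_with_trials : Prop := ∀ (eggs : Int) (trials : Int), Dom_max_floors_with_trials eggs trials → Pre_max_floors_with_trials eggs trials → Spec_max_floors_with_trials eggs trials (max_floors_with_trials eggs trials)

-- ===== LEMMAS AND PROOFS =====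

-- the DP recurrence as a pure function
def pvF : Nat → Nat → Int
  | _, 0 => 0
  | 0, _ + 1 => 0
  | e + 1, t + 1 => pvF e t + pvF (e + 1) t + 1

-- abstract table: dp[e][t'] = g e t' for e ≤ E, t' ≤ T
def pvTbl (E T : Nat) (g : Nat → Nat → Int) : List (List Int) :=
  (List.range (E + 1)).map (fun e => (List.range (T + 1)).map (g e))

-- table contents after processing columns 1..t
def pvG (t : Nat) : Nat → Nat → Int := fun e t' => if t' ≤ t then pvF e t' else 0

theorem pvRowLoop_eq (trials : Int) : ∀ (k : Nat) (j : Int) (row : List Int),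
    k = (trials + 1 - j).toNat → pvRowLoop trials row j = row ++ List.replicate k 0 := by
  intro k
  induction k with
  | zero =>
    intro j row h
    rw [pvRowLoop, if_neg (by omega)]
    simp
  | succ k ih =>
    intro j row h
    rw [pvRowLoop, if_pos (by omega), ih (j + 1) _ (by omega)]
    simp [List.replicate_succ]

theorem pvInitLoop_eq (eggs trials : Int) : ∀ (k : Nat) (i : Int) (dp : List (List Int)),
    k = (eggs + 1 - i).toNat →
    pvInitLoop eggs trials dp i = dp ++ List.replicate k (pvRowLoop trials [] 0) := by
  intro k
  induction k with
  | zero =>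
    intro i dp h
    rw [pvInitLoop, if_neg (by omega)]
    simp
  | succ k ih =>
    intro i dp h
    rw [pvInitLoop, if_pos (by omega), ih (i + 1) _ (by omega)]
    simp [List.replicate_succ]

theorem pvTbl_congr (E T : Nat) (g h : Nat → Nat → Int)
    (hg : ∀ e ≤ E, ∀ t ≤ T, g e t = h e t) : pvTbl E T g = pvTbl E T h := by
  unfold pvTbl
  refine List.map_congr_left ?_
  intro e he
  refine List.map_congr_left ?_
  intro t ht
  have he' := List.mem_range.mp he
  have ht' := List.mem_range.mp ht
  exact hg e (by omega) t (by omega)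

theorem pvTbl_zero (E T : Nat) :
    List.replicate (E + 1) (List.replicate (T + 1) (0 : Int)) = pvTbl E T (fun _ _ => 0) := by
  apply List.ext_getElem
  · simp [pvTbl]
  · intro i h1 h2
    simp only [pvTbl, List.getElem_replicate, List.getElem_map]
    apply List.ext_getElem
    · simp
    · intro j h3 h4
      simp

theorem pyGetD_pvTbl (E T : Nat) (g : Nat → Nat → Int) (e t : Nat) (he : e ≤ E) (ht : t ≤ T) :
    PySem.List.pyGetD (PySem.List.pyGetD (pvTbl E T g) (e : Int) []) (t : Int) 0 = g e t := by
  have h1 : e < E + 1 := by omega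
  have h2 : t < T + 1 := by omega
  simp [pvTbl, List.getD_eq_getElem?_getD, h1, h2]

theorem pyGetD_pvTbl_row (E T : Nat) (g : Nat → Nat → Int) (e : Nat) (he : e ≤ E) :
    PySem.List.pyGetD (pvTbl E T g) (e : Int) [] = (List.range (T + 1)).map (g e) := by
  have h1 : e < E + 1 := by omega
  simp [pvTbl, List.getD_eq_getElem?_getD, h1]

theorem pvSetMapRange {α : Type} (n i : Nat) (_hi : i < n) (f : Nat → α) (w : α) :
    ((List.range n).map f).set i w = (List.range n).map (fun j => if j = i then w else f j) := by
  apply List.ext_getElem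
  · simp
  · intro k h1 h2
    simp only [List.getElem_set, List.getElem_map, List.getElem_range] at *
    by_cases h : i = k
    · subst h; simp
    · simp [h, Ne.symm h]

theorem pySetD_pvTbl (E T : Nat) (g : Nat → Nat → Int) (e t : Nat) (he : e ≤ E) (ht : t ≤ T) (v : Int) :
    PySem.List.pySetD (pvTbl E T g) (e : Int)
      (PySem.List.pySetD (PySem.List.pyGetD (pvTbl E T g) (e : Int) []) (t : Int) v)
    = pvTbl E T (fun e' t' => if e' = e ∧ t' = t then v else g e' t') := by
  rw [pyGetD_pvTbl_row E T g e he, PySem.List.pySetD_natCast, PySem.List.pySetD_natCast]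
  rw [pvSetMapRange (T + 1) t (by omega) (g e) v]
  conv_lhs => rw [pvTbl]
  rw [pvSetMapRange (E + 1) e (by omega)]
  unfold pvTbl
  refine List.map_congr_left ?_
  intro e' he'
  by_cases h : e' = e
  · subst h
    rw [if_pos rfl]
    refine List.map_congr_left ?_
    intro t' ht'
    by_cases h2 : t' = t
    · subst h2; rw [if_pos rfl]; simp
    · rw [if_neg h2]; simp [h2]
  · rw [if_neg h]
    refine List.map_congr_left ?_
    intro t' ht'
    simp [h]

theorem pvELoop_eq (E T t : Nat) (ht1 : 1 ≤ t) (ht : t ≤ T) :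
    ∀ (k e0 : Nat) (g : Nat → Nat → Int), 1 ≤ e0 → k = (E + 1 - e0) →
    pvELoop (E : Int) (t : Int) (pvTbl E T g) (e0 : Int)
      = pvTbl E T (fun e' t' => if e0 ≤ e' ∧ t' = t then
          g (e' - 1) (t - 1) + g e' (t - 1) + 1 else g e' t') := by
  intro k
  induction k with
  | zero =>
    intro e0 g he0 hk
    rw [pvELoop, if_neg (by omega)]
    apply pvTbl_congr
    intro e' he' t' ht'
    rw [if_neg (by omega)]
  | succ k ih =>
    intro e0 g he0 hk
    have he0E : e0 ≤ E := by omega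
    rw [pvELoop, if_pos (by omega)]
    rw [pySetD_pvTbl E T g e0 t he0E ht]
    have hV : PySem.List.pyGetD (PySem.List.pyGetD (pvTbl E T g) ((e0 : Int) - 1) []) ((t : Int) - 1) 0
            + PySem.List.pyGetD (PySem.List.pyGetD (pvTbl E T g) (e0 : Int) []) ((t : Int) - 1) 0 + 1
            = g (e0 - 1) (t - 1) + g e0 (t - 1) + 1 := by
      rw [show ((e0 : Int) - 1) = ((e0 - 1 : Nat) : Int) by omega,
          show ((t : Int) - 1) = ((t - 1 : Nat) : Int) by omega,
          pyGetD_pvTbl E T g (e0 - 1) (t - 1) (by omega) (by omega),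
          pyGetD_pvTbl E T g e0 (t - 1) he0E (by omega)]
    simp only [hV]
    rw [show ((e0 : Int) + 1) = ((e0 + 1 : Nat) : Int) by push_cast; ring]
    rw [ih (e0 + 1) _ (by omega) (by omega)]
    apply pvTbl_congr
    intro e' he' t' ht'
    rcases eq_or_ne t' t with rfl | hne
    · by_cases hlt : e' < e0
      · rw [if_neg (by omega), if_neg (by omega), if_neg (by omega)]
      · rcases eq_or_ne e' e0 with rfl | hne'
        · rw [if_neg (by omega), if_pos ⟨rfl, rfl⟩, if_pos (by omega)]
        · rw [if_pos (by omega), if_neg (by omega), if_neg (by omega), if_pos (by omega)]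
    · rw [if_neg (by omega), if_neg (by omega), if_neg (by omega)]

theorem pvTLoop_eq (E T : Nat) : ∀ (k t0 : Nat), 1 ≤ t0 → k = (T + 1 - t0) →
    pvTLoop (E : Int) (T : Int) (pvTbl E T (pvG (t0 - 1))) (t0 : Int) = pvTbl E T (pvG T) := by
  intro k
  induction k with
  | zero =>
    intro t0 h1 hk
    rw [pvTLoop, if_neg (by omega)]
    apply pvTbl_congr
    intro e he t' ht'
    unfold pvG
    rw [if_pos (by omega), if_pos ht']
  | succ k ih =>
    intro t0 h1 hk
    have h2 : t0 ≤ T := by omega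
    rw [pvTLoop, if_pos (by omega)]
    rw [show (1 : Int) = ((1 : Nat) : Int) by norm_num]
    rw [pvELoop_eq E T t0 h1 h2 E 1 (pvG (t0 - 1)) le_rfl (by omega)]
    have hmid : pvTbl E T (fun e' t' => if 1 ≤ e' ∧ t' = t0 then
          pvG (t0 - 1) (e' - 1) (t0 - 1) + pvG (t0 - 1) e' (t0 - 1) + 1 else pvG (t0 - 1) e' t')
        = pvTbl E T (pvG t0) := by
      apply pvTbl_congr
      intro e' he' t' ht'
      unfold pvG
      rcases eq_or_ne t' t0 with rfl | hne
      · rcases Nat.eq_zero_or_pos e' with rfl | hpos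
        · rw [if_neg (by omega), if_neg (by omega), if_pos le_rfl]
          obtain ⟨s, rfl⟩ : ∃ s, t' = s + 1 := ⟨t' - 1, by omega⟩
          rfl
        · obtain ⟨m, rfl⟩ : ∃ m, e' = m + 1 := ⟨e' - 1, by omega⟩
          obtain ⟨s, hs⟩ : ∃ s, t' = s + 1 := ⟨t' - 1, by omega⟩
          subst hs
          rw [if_pos ⟨by omega, rfl⟩, if_pos le_rfl]
          simp only [Nat.add_sub_cancel]
          rw [if_pos le_rfl, if_pos le_rfl]
          rfl
      · rw [if_neg (by omega)]
        by_cases hle : t' ≤ t0 - 1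
        · rw [if_pos hle, if_pos (by omega)]
        · rw [if_neg (by omega), if_neg (by omega)]
    rw [hmid]
    have hrec := ih (t0 + 1) (by omega) (by omega)
    rw [show ((t0 : Int) + ((1 : Nat) : Int)) = ((t0 + 1 : Nat) : Int) by push_cast; ring]
    simpa using hrec

theorem portA_eq_pvF (E T : Nat) : max_floors_with_trials (E : Int) (T : Int) = pvF E T := by
  unfold max_floors_with_trials
  rw [pvInitLoop_eq (E : Int) (T : Int) (E + 1) 0 [] (by omega)]
  rw [pvRowLoop_eq (T : Int) (T + 1) 0 [] (by omega)]
  simp only [List.nil_append]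
  rw [pvTbl_zero]
  have h0 : pvTbl E T (fun _ _ => 0) = pvTbl E T (pvG 0) := by
    apply pvTbl_congr
    intro e he t' ht'
    unfold pvG
    rcases Nat.eq_zero_or_pos t' with rfl | hp
    · rw [if_pos le_rfl]; cases e <;> rfl
    · rw [if_neg (by omega)]
  rw [h0]
  rw [show (1 : Int) = ((1 : Nat) : Int) by norm_num]
  rw [show pvG 0 = pvG (1 - 1) from rfl]
  rw [pvTLoop_eq E T T 1 le_rfl (by omega)]
  rw [pyGetD_pvTbl E T (pvG T) E T le_rfl le_rfl]
  unfold pvG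
  rw [if_pos le_rfl]

theorem pvF_eq_sum (t : Nat) : ∀ (e : Nat),
    pvF e t = ∑ i ∈ Finset.range e, ((t.choose (i + 1) : Int)) := by
  induction t with
  | zero =>
    intro e
    have h : ∀ i, ((Nat.choose 0 (i + 1) : Nat) : Int) = 0 := by intro i; simp
    simp only [h, Finset.sum_const_zero]
    cases e <;> rfl
  | succ t ih =>
    intro e
    cases e with
    | zero => simp [pvF]
    | succ m =>
      have hrec : pvF (m + 1) (t + 1) = pvF m t + pvF (m + 1) t + 1 := rfl
      rw [hrec, ih m, ih (m + 1)]
      have h1 : ∀ i ∈ Finset.range (m + 1),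
          ((Nat.choose (t + 1) (i + 1) : Nat) : Int) = (t.choose i : Int) + (t.choose (i + 1) : Int) := by
        intro i _
        exact_mod_cast Nat.choose_succ_succ t i
      rw [Finset.sum_congr rfl h1, Finset.sum_add_distrib]
      rw [Finset.sum_range_succ' (fun i => ((t.choose i : Nat) : Int)) m]
      simp only [Nat.choose_zero_right, Nat.cast_one]
      ring

theorem pvBStep (T E : Nat) :
    PySem.Int.floordiv ((T.choose E : Int) * ((T : Int) - (E : Int))) ((E : Int) + 1)
      = (T.choose (E + 1) : Int) := by
  by_cases h : E + 1 ≤ T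
  · have hc : ((T - E : Nat) : Int) = (T : Int) - E := by omega
    have hnum : (T.choose E : Int) * ((T : Int) - E) = ((T.choose (E + 1) * (E + 1) : Nat) : Int) := by
      rw [← hc]
      exact_mod_cast (Nat.choose_succ_right_eq T E).symm
    rw [hnum, show ((E : Int) + 1) = ((E + 1 : Nat) : Int) by push_cast; ring,
        PySem.Int.floordiv_natCast, Nat.mul_div_cancel _ (by omega)]
  · have h0 : (T.choose E : Int) * ((T : Int) - E) = 0 := by
      rcases eq_or_lt_of_le (by omega : T ≤ E) with rfl | hlt
      · simp
      · simp [Nat.choose_eq_zero_of_lt hlt]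
    rw [h0, PySem.Int.floordiv_eq_ediv_of_pos (by omega)]
    simp [Nat.choose_eq_zero_of_lt (by omega : T < E + 1)]

theorem portB_eq_sum (T : Nat) : ∀ (E : Nat),
    ((PySem.List.pyRange 1 ((E : Int) + 1) 1).foldl
      (fun (s : Int × Int) (i : Int) =>
        let c := PySem.Int.floordiv (s.2 * ((T : Int) - i + 1)) i
        (s.1 + c, c)) ((0 : Int), (1 : Int)))
    = (∑ i ∈ Finset.range E, ((T.choose (i + 1) : Int)), (T.choose E : Int)) := by
  intro E
  induction E with
  | zero =>
    rw [show ((0 : Nat) : Int) + 1 = 1 by norm_num, PySem.List.pyRange_one_eq_nil (by norm_num)]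
    simp
  | succ E ih =>
    rw [show ((E + 1 : Nat) : Int) + 1 = ((E : Int) + 1) + 1 by push_cast; ring]
    rw [PySem.List.pyRange_one_succ_right (by omega)]
    rw [List.foldl_append, ih]
    simp only [List.foldl_cons, List.foldl_nil]
    rw [show (T : Int) - ((E : Int) + 1) + 1 = (T : Int) - (E : Int) by ring]
    rw [pvBStep T E, Finset.sum_range_succ]

-- ===== VERDICT (by name: the statement is the Claim_ definition above) =====
theorem max_floors_with_trials_spec : Claim_equal_max_floors_with_trials := by
  intro eggs trials _ hpre
  obtain ⟨he, ht⟩ := hpre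
  obtain ⟨E, rfl⟩ : ∃ E : Nat, eggs = (E : Int) := ⟨eggs.toNat, (Int.toNat_of_nonneg he).symm⟩
  obtain ⟨T, rfl⟩ : ∃ T : Nat, trials = (T : Int) := ⟨trials.toNat, (Int.toNat_of_nonneg ht).symm⟩
  show max_floors_with_trials (E : Int) (T : Int) = max_floors_with_trials_alt (E : Int) (T : Int)
  rw [portA_eq_pvF, pvF_eq_sum T E]
  unfold max_floors_with_trials_alt
  rw [portB_eq_sum T E]
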